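-- pv_equiv track=rewrite | github.com/KevzPeter/Advent-of-Code-2025 | Dec_9/solution_2.py | compress_coords
-- ===== SOURCE A (Python) =====
-- from typing import List, Tuple, Dict
--
-- Point = Tuple[int, int]
--
-- def compress_coords(loop: List[Point]) -> Tuple[List[int], List[int]]:
--     # Model each tile (x,y) as the unit square [x, x+1) x [y, y+1)
--     xs = set()
--     ys = set()
--     n = len(loop)
--
--     for i in range(n):
--         x1, y1 = loop[i]
--         x2, y2 = loop[(i + 1) % n]
--
--         # add edges for endpoints
--         xs.add(x1)
--         xs.add(x1 + 1)
--         ys.add(y1)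
--         ys.add(y1 + 1)
--
--         xs.add(x2)
--         xs.add(x2 + 1)
--         ys.add(y2)
--         ys.add(y2 + 1)
--
--         # add edges for the whole segment span
--         if x1 == x2:
--             lo, hi = sorted((y1, y2))
--             ys.add(lo)
--             ys.add(hi + 1)
--             ys.add(lo + 1)
--             ys.add(hi)  # helps keep adjacency correct
--         elif y1 == y2:
--             lo, hi = sorted((x1, x2))
--             xs.add(lo)
--             xs.add(hi + 1)
--             xs.add(lo + 1)
--             xs.add(hi)
--         else:
--             raise ValueError("Consecutive points must share row or column")
--
--     # Add a padding frame so outside flood-fill has room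
--     minx, maxx = min(xs), max(xs)
--     miny, maxy = min(ys), max(ys)
--     xs.add(minx - 1)
--     xs.add(maxx + 1)
--     ys.add(miny - 1)
--     ys.add(maxy + 1)
--
--     xs = sorted(xs)
--     ys = sorted(ys)
--     return xs, ys
-- ===== SOURCE B (Python) =====
-- def compress_coords(loop):
--     # validation: every consecutive pair (with wrap) must share a row or a column
--     for (x1, y1), (x2, y2) in zip(loop, loop[1:] + loop[:1]):
--         if x1 != x2 and y1 != y2:
--             raise ValueError("Consecutive points must share row or column")
--
--     def emit(s):
--         # s is a sorted strictly-increasing list; produce sorted union of {v, v+1}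
--         if len(s) == 1:
--             return [s[0], s[0] + 1]
--         rest = emit(s[1:])
--         if s[1] > s[0] + 1:
--             return [s[0], s[0] + 1] + rest
--         return [s[0]] + rest
--
--     def axis(vals):
--         s = sorted(set(vals))
--         return [s[0] - 1] + emit(s) + [s[-1] + 2]
--
--     return axis([x for x, _ in loop]), axis([y for _, y in loop])
-- ===== Notes on version B (the rewrite author's own statement) =====
-- stated objective: alternative
-- what changed: B validates the edges in one pass, then per axis sorts the deduplicated point coordinates once and emits the final compressed list directly in increasing order by a recursive gap-merge over adjacent sorted values (prepending min-1 and appending max+2), instead of A's single loop that accumulates endpoint and span coordinates into sets and sorts the sets at the end.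
import Mathlib
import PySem

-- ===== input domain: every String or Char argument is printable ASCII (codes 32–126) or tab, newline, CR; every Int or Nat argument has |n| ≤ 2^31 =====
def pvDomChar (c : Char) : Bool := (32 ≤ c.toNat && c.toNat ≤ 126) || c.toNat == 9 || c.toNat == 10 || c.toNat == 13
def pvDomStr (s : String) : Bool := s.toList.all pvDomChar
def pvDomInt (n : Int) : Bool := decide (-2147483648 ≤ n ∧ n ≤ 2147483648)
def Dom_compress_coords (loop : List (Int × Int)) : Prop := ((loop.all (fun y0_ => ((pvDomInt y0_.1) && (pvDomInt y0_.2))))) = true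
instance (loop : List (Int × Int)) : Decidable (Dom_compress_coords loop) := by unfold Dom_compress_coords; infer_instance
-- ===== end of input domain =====

-- B replaces A's set-accumulation-then-sort by: validate edges, sort the deduplicated point
-- coordinates per axis, and emit the output list directly in order by a recursive gap-merge;
-- objective: alternative (same cost, differently shaped computation).


-- ===== PORT A =====
-- one iteration of A's loop body (state = the pair of sets (xs, ys))
def stepA (loop : List (Int × Int)) (n : Int) (st : PySem.Set Int × PySem.Set Int) (i : Int) :
    PySem.Set Int × PySem.Set Int :=
  let p1 := PySem.List.pyGetD loop i (0, 0)
  let p2 := PySem.List.pyGetD loop (PySem.Int.mod (i + 1) n) (0, 0)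
  let xs := PySem.Set.add (PySem.Set.add (PySem.Set.add (PySem.Set.add st.1 p1.1) (p1.1 + 1)) p2.1) (p2.1 + 1)
  let ys := PySem.Set.add (PySem.Set.add (PySem.Set.add (PySem.Set.add st.2 p1.2) (p1.2 + 1)) p2.2) (p2.2 + 1)
  if p1.1 = p2.1 then
    let lo := min p1.2 p2.2
    let hi := max p1.2 p2.2
    (xs, PySem.Set.add (PySem.Set.add (PySem.Set.add (PySem.Set.add ys lo) (hi + 1)) (lo + 1)) hi)
  else if p1.2 = p2.2 then
    let lo := min p1.1 p2.1
    let hi := max p1.1 p2.1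
    (PySem.Set.add (PySem.Set.add (PySem.Set.add (PySem.Set.add xs lo) (hi + 1)) (lo + 1)) hi, ys)
  else
    -- Python: raise ValueError("Consecutive points must share row or column")  — excluded by Pre_
    (xs, ys)

def compress_coords (loop : List (Int × Int)) : List Int × List Int :=
  let n : Int := PySem.List.len loop
  let st := (PySem.List.pyRange 0 n 1).foldl (stepA loop n) (PySem.Set.empty, PySem.Set.empty)
  -- min()/max() of an empty set raise ValueError — excluded by Pre_ (loop ≠ []); .getD 0 is never used inside Pre_
  let minx := (PySem.List.min? st.1 (fun v => v)).getD 0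
  let maxx := (PySem.List.max? st.1 (fun v => v)).getD 0
  let miny := (PySem.List.min? st.2 (fun v => v)).getD 0
  let maxy := (PySem.List.max? st.2 (fun v => v)).getD 0
  let xs := PySem.Set.add (PySem.Set.add st.1 (minx - 1)) (maxx + 1)
  let ys := PySem.Set.add (PySem.Set.add st.2 (miny - 1)) (maxy + 1)
  (PySem.List.sorted xs (fun v => v) false, PySem.List.sorted ys (fun v => v) false)

-- ===== PORT B =====
-- Source B's validation pass over zip(loop, loop[1:] + loop[:1]); the Python body raises ValueError on
-- a bad pair (excluded by Pre_); slices loop[1:] / loop[:1] rendered as drop 1 / take 1 (exact here)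
def validEdges (loop : List (Int × Int)) : Bool :=
  (loop.zip (loop.drop 1 ++ loop.take 1)).all fun p => p.1.1 == p.2.1 || p.1.2 == p.2.2

-- Source B's recursive emit: s sorted strictly increasing → sorted union of {v, v+1 | v ∈ s}
-- ([] is unreachable from axisB under Pre_: Python's emit is only called on nonempty s)
def emitB : List Int → List Int
  | [] => []
  | [v] => [v, v + 1]
  | v :: w :: t =>
      let rest := emitB (w :: t)
      if w > v + 1 then v :: (v + 1) :: rest else v :: rest

-- Source B's axis: sorted(set(vals)), then [s[0]-1] + emit(s) + [s[-1]+2]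
-- (s[0] / s[-1] on empty s raise IndexError — excluded by Pre_; the default 0 is never used there)
def axisB (vals : List Int) : List Int :=
  let s := PySem.List.sorted (PySem.Set.ofList vals) (fun v => v) false
  (PySem.List.pyGetD s 0 0 - 1) :: emitB s ++ [PySem.List.pyGetD s (-1) 0 + 2]

def compress_coords_alt (loop : List (Int × Int)) : List Int × List Int :=
  let _valid := validEdges loop
  (axisB (loop.map (fun p => p.1)), axisB (loop.map (fun p => p.2)))

-- ===== PRECONDITION & SPEC =====
-- Pre_ excludes exactly the inputs where the Python A raises ValueError: the empty loop (min of an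
-- empty set) and loops with a consecutive pair (wrapping around) sharing neither row nor column.
def Pre_compress_coords (loop : List (Int × Int)) : Prop :=
  loop ≠ [] ∧ ∀ p ∈ loop.zip (loop.rotate 1), p.1.1 = p.2.1 ∨ p.1.2 = p.2.2
instance (loop : List (Int × Int)) : Decidable (Pre_compress_coords loop) := by
  unfold Pre_compress_coords; infer_instance

def pvWitness_compress_coords : (List (Int × Int)) := [(0, 0), (1, 0), (1, 1), (0, 1)]

def Spec_compress_coords (loop : List (Int × Int)) (out : List Int × List Int) : Prop := out = compress_coords_alt loop
instance (loop : List (Int × Int)) (out : List Int × List Int) : Decidable (Spec_compress_coords loop out) := by unfold Spec_compress_coords; infer_instance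

-- ===== CLAIM (what is proved, stated in full; the proofs are below) =====
def Claim_equal_compress_coords : Prop := ∀ (loop : List (Int × Int)), Dom_compress_coords loop → Pre_compress_coords loop → Spec_compress_coords loop (compress_coords loop)


-- ===== LEMMAS AND PROOFS =====

-- the two points A's iteration i reads
def pA (loop : List (Int × Int)) (i : Int) : Int × Int := PySem.List.pyGetD loop i (0, 0)
def pB (loop : List (Int × Int)) (n i : Int) : Int × Int :=
  PySem.List.pyGetD loop (PySem.Int.mod (i + 1) n) (0, 0)

theorem mem_stepA_fst (loop : List (Int × Int)) (n : Int) (st : PySem.Set Int × PySem.Set Int)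
    (i a : Int) (hv : (pA loop i).1 = (pB loop n i).1 ∨ (pA loop i).2 = (pB loop n i).2) :
    a ∈ (stepA loop n st i).1 ↔ a ∈ st.1 ∨ a = (pA loop i).1 ∨ a = (pA loop i).1 + 1 ∨
      a = (pB loop n i).1 ∨ a = (pB loop n i).1 + 1 := by
  rcases hv with hv | hv
  · simp only [stepA, pA, pB] at *
    rw [if_pos hv]
    simp [PySem.Set.mem_add]; tauto
  · simp only [stepA, pA, pB] at *
    by_cases h1 : (PySem.List.pyGetD loop i (0, 0)).1 = (PySem.List.pyGetD loop (PySem.Int.mod (i + 1) n) (0, 0)).1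
    · rw [if_pos h1]; simp [PySem.Set.mem_add]; tauto
    · rw [if_neg h1, if_pos hv]
      rcases le_total (PySem.List.pyGetD loop i (0, 0)).1 (PySem.List.pyGetD loop (PySem.Int.mod (i + 1) n) (0, 0)).1 with h | h
      · simp [PySem.Set.mem_add, min_eq_left h, max_eq_right h]; tauto
      · simp [PySem.Set.mem_add, min_eq_right h, max_eq_left h]; tauto

theorem mem_stepA_snd (loop : List (Int × Int)) (n : Int) (st : PySem.Set Int × PySem.Set Int)
    (i a : Int) (hv : (pA loop i).1 = (pB loop n i).1 ∨ (pA loop i).2 = (pB loop n i).2) :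
    a ∈ (stepA loop n st i).2 ↔ a ∈ st.2 ∨ a = (pA loop i).2 ∨ a = (pA loop i).2 + 1 ∨
      a = (pB loop n i).2 ∨ a = (pB loop n i).2 + 1 := by
  rcases hv with hv | hv
  · simp only [stepA, pA, pB] at *
    rw [if_pos hv]
    rcases le_total (PySem.List.pyGetD loop i (0, 0)).2 (PySem.List.pyGetD loop (PySem.Int.mod (i + 1) n) (0, 0)).2 with h | h
    · simp [PySem.Set.mem_add, min_eq_left h, max_eq_right h]; tauto
    · simp [PySem.Set.mem_add, min_eq_right h, max_eq_left h]; tauto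
  · simp only [stepA, pA, pB] at *
    by_cases h1 : (PySem.List.pyGetD loop i (0, 0)).1 = (PySem.List.pyGetD loop (PySem.Int.mod (i + 1) n) (0, 0)).1
    · rw [if_pos h1]
      rcases le_total (PySem.List.pyGetD loop i (0, 0)).2 (PySem.List.pyGetD loop (PySem.Int.mod (i + 1) n) (0, 0)).2 with h | h
      · simp [PySem.Set.mem_add, min_eq_left h, max_eq_right h]; tauto
      · simp [PySem.Set.mem_add, min_eq_right h, max_eq_left h]; tauto
    · rw [if_neg h1, if_pos hv]
      simp [PySem.Set.mem_add]; tauto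

theorem nodup_stepA (loop : List (Int × Int)) (n : Int) (st : PySem.Set Int × PySem.Set Int)
    (i : Int) (h1 : st.1.Nodup) (h2 : st.2.Nodup) :
    (stepA loop n st i).1.Nodup ∧ (stepA loop n st i).2.Nodup := by
  simp only [stepA]
  split_ifs <;>
    exact ⟨by repeat' apply PySem.Set.nodup_add; repeat' apply PySem.Set.nodup_add; exact h1,
           by repeat' apply PySem.Set.nodup_add; repeat' apply PySem.Set.nodup_add; exact h2⟩

theorem mem_foldA_fst (loop : List (Int × Int)) (n : Int) (l : List Int)
    (hv : ∀ i ∈ l, (pA loop i).1 = (pB loop n i).1 ∨ (pA loop i).2 = (pB loop n i).2)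
    (st : PySem.Set Int × PySem.Set Int) (a : Int) :
    a ∈ (l.foldl (stepA loop n) st).1 ↔ a ∈ st.1 ∨ ∃ i ∈ l, a = (pA loop i).1 ∨
      a = (pA loop i).1 + 1 ∨ a = (pB loop n i).1 ∨ a = (pB loop n i).1 + 1 := by
  induction l generalizing st with
  | nil => simp
  | cons j t ih =>
    simp only [List.foldl_cons]
    rw [ih (fun i hi => hv i (List.mem_cons_of_mem _ hi)),
        mem_stepA_fst loop n st j a (hv j (List.mem_cons_self))]
    simp only [List.mem_cons]
    constructor
    · rintro ((h | h) | ⟨i, hi, h⟩)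
      · exact Or.inl h
      · exact Or.inr ⟨j, Or.inl rfl, by tauto⟩
      · exact Or.inr ⟨i, Or.inr hi, h⟩
    · rintro (h | ⟨i, (rfl | hi), h⟩)
      · exact Or.inl (Or.inl h)
      · exact Or.inl (Or.inr (by tauto))
      · exact Or.inr ⟨i, hi, h⟩

theorem mem_foldA_snd (loop : List (Int × Int)) (n : Int) (l : List Int)
    (hv : ∀ i ∈ l, (pA loop i).1 = (pB loop n i).1 ∨ (pA loop i).2 = (pB loop n i).2)
    (st : PySem.Set Int × PySem.Set Int) (a : Int) :
    a ∈ (l.foldl (stepA loop n) st).2 ↔ a ∈ st.2 ∨ ∃ i ∈ l, a = (pA loop i).2 ∨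
      a = (pA loop i).2 + 1 ∨ a = (pB loop n i).2 ∨ a = (pB loop n i).2 + 1 := by
  induction l generalizing st with
  | nil => simp
  | cons j t ih =>
    simp only [List.foldl_cons]
    rw [ih (fun i hi => hv i (List.mem_cons_of_mem _ hi)),
        mem_stepA_snd loop n st j a (hv j (List.mem_cons_self))]
    simp only [List.mem_cons]
    constructor
    · rintro ((h | h) | ⟨i, hi, h⟩)
      · exact Or.inl h
      · exact Or.inr ⟨j, Or.inl rfl, by tauto⟩
      · exact Or.inr ⟨i, Or.inr hi, h⟩
    · rintro (h | ⟨i, (rfl | hi), h⟩)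
      · exact Or.inl (Or.inl h)
      · exact Or.inl (Or.inr (by tauto))
      · exact Or.inr ⟨i, hi, h⟩

theorem nodup_foldA (loop : List (Int × Int)) (n : Int) (l : List Int)
    (st : PySem.Set Int × PySem.Set Int) (h1 : st.1.Nodup) (h2 : st.2.Nodup) :
    (l.foldl (stepA loop n) st).1.Nodup ∧ (l.foldl (stepA loop n) st).2.Nodup := by
  induction l generalizing st with
  | nil => exact ⟨h1, h2⟩
  | cons j t ih =>
    obtain ⟨k1, k2⟩ := nodup_stepA loop n st j h1 h2
    exact ih _ k1 k2

theorem pA_eval (loop : List (Int × Int)) (k : Nat) (hk : k < loop.length) :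
    pA loop (↑k) = loop[k] := by
  rw [pA, PySem.List.pyGetD_eq_getElem loop (0, 0) (by positivity) (by exact_mod_cast hk)]
  simp

theorem pB_eval (loop : List (Int × Int)) (k : Nat) (hk : k < loop.length) :
    pB loop (↑loop.length) (↑k) = loop[(k + 1) % loop.length]'(Nat.mod_lt _ (by omega)) := by
  have hcast : ((k : Int) + 1) = ((k + 1 : Nat) : Int) := by push_cast; ring
  rw [pB, hcast, PySem.Int.mod_natCast,
      PySem.List.pyGetD_eq_getElem loop (0, 0) (by positivity)
        (by exact_mod_cast Nat.mod_lt _ (show 0 < loop.length by omega))]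
  congr 1

theorem pre_pair (loop : List (Int × Int)) (h : Pre_compress_coords loop) (k : Nat)
    (hk : k < loop.length) :
    (loop[k]).1 = (loop[(k + 1) % loop.length]'(Nat.mod_lt _ (by omega))).1 ∨
    (loop[k]).2 = (loop[(k + 1) % loop.length]'(Nat.mod_lt _ (by omega))).2 := by
  have hzlen : (loop.zip (loop.rotate 1)).length = loop.length := by
    simp [List.length_zip, List.length_rotate]
  have hmem : (loop.zip (loop.rotate 1))[k]'(by omega) ∈ loop.zip (loop.rotate 1) :=
    List.getElem_mem _
  have := h.2 _ hmem
  simpa [List.getElem_zip, List.getElem_rotate, Nat.add_comm] using this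

theorem hv_range (loop : List (Int × Int)) (h : Pre_compress_coords loop) :
    ∀ i ∈ PySem.List.pyRange 0 (PySem.List.len loop) 1,
      (pA loop i).1 = (pB loop (PySem.List.len loop) i).1 ∨
      (pA loop i).2 = (pB loop (PySem.List.len loop) i).2 := by
  intro i hi
  rw [PySem.List.mem_pyRange_one] at hi
  obtain ⟨k, rfl⟩ : ∃ k : Nat, i = ↑k := ⟨i.toNat, by omega⟩
  have hk : k < loop.length := by
    have := hi.2; simp [PySem.List.len] at this; exact_mod_cast this
  rw [show PySem.List.len loop = ((loop.length : Int)) from by simp [PySem.List.len],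
      pA_eval loop k hk, pB_eval loop k hk]
  exact pre_pair loop h k hk

-- an index-based candidate is exactly an endpoint coordinate of a loop point
theorem exists_range_iff_fst (loop : List (Int × Int)) (a : Int) :
    (∃ i ∈ PySem.List.pyRange 0 (PySem.List.len loop) 1,
        a = (pA loop i).1 ∨ a = (pA loop i).1 + 1 ∨
        a = (pB loop (PySem.List.len loop) i).1 ∨ a = (pB loop (PySem.List.len loop) i).1 + 1) ↔
      ∃ p ∈ loop, a = p.1 ∨ a = p.1 + 1 := by
  have hlen : PySem.List.len loop = (loop.length : Int) := by simp [PySem.List.len]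
  constructor
  · rintro ⟨i, hi, hcand⟩
    rw [PySem.List.mem_pyRange_one] at hi
    obtain ⟨k, rfl⟩ : ∃ k : Nat, i = ↑k := ⟨i.toNat, by omega⟩
    have hk : k < loop.length := by rw [hlen] at hi; exact_mod_cast hi.2
    rw [hlen, pA_eval loop k hk, pB_eval loop k hk] at hcand
    rcases hcand with h' | h' | h' | h'
    · exact ⟨loop[k], List.getElem_mem _, Or.inl h'⟩
    · exact ⟨loop[k], List.getElem_mem _, Or.inr h'⟩
    · exact ⟨_, List.getElem_mem _, Or.inl h'⟩
    · exact ⟨_, List.getElem_mem _, Or.inr h'⟩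
  · rintro ⟨p, hp, hcand⟩
    obtain ⟨k, hk, rfl⟩ := List.mem_iff_getElem.mp hp
    refine ⟨↑k, ?_, ?_⟩
    · rw [PySem.List.mem_pyRange_one, hlen]; constructor <;> [positivity; exact_mod_cast hk]
    · rw [hlen, pA_eval loop k hk]; tauto

theorem exists_range_iff_snd (loop : List (Int × Int)) (a : Int) :
    (∃ i ∈ PySem.List.pyRange 0 (PySem.List.len loop) 1,
        a = (pA loop i).2 ∨ a = (pA loop i).2 + 1 ∨
        a = (pB loop (PySem.List.len loop) i).2 ∨ a = (pB loop (PySem.List.len loop) i).2 + 1) ↔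
      ∃ p ∈ loop, a = p.2 ∨ a = p.2 + 1 := by
  have hlen : PySem.List.len loop = (loop.length : Int) := by simp [PySem.List.len]
  constructor
  · rintro ⟨i, hi, hcand⟩
    rw [PySem.List.mem_pyRange_one] at hi
    obtain ⟨k, rfl⟩ : ∃ k : Nat, i = ↑k := ⟨i.toNat, by omega⟩
    have hk : k < loop.length := by rw [hlen] at hi; exact_mod_cast hi.2
    rw [hlen, pA_eval loop k hk, pB_eval loop k hk] at hcand
    rcases hcand with h' | h' | h' | h'
    · exact ⟨loop[k], List.getElem_mem _, Or.inl h'⟩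
    · exact ⟨loop[k], List.getElem_mem _, Or.inr h'⟩
    · exact ⟨_, List.getElem_mem _, Or.inl h'⟩
    · exact ⟨_, List.getElem_mem _, Or.inr h'⟩
  · rintro ⟨p, hp, hcand⟩
    obtain ⟨k, hk, rfl⟩ := List.mem_iff_getElem.mp hp
    refine ⟨↑k, ?_, ?_⟩
    · rw [PySem.List.mem_pyRange_one, hlen]; constructor <;> [positivity; exact_mod_cast hk]
    · rw [hlen, pA_eval loop k hk]; tauto

theorem sA_mem_fst (loop : List (Int × Int)) (hpre : Pre_compress_coords loop) (a : Int) :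
    a ∈ ((PySem.List.pyRange 0 (PySem.List.len loop) 1).foldl
        (stepA loop (PySem.List.len loop)) (PySem.Set.empty, PySem.Set.empty)).1 ↔
      ∃ p ∈ loop, a = p.1 ∨ a = p.1 + 1 := by
  rw [mem_foldA_fst loop _ _ (hv_range loop hpre) _ a, exists_range_iff_fst loop a]
  simp [PySem.Set.empty]

theorem sA_mem_snd (loop : List (Int × Int)) (hpre : Pre_compress_coords loop) (a : Int) :
    a ∈ ((PySem.List.pyRange 0 (PySem.List.len loop) 1).foldl
        (stepA loop (PySem.List.len loop)) (PySem.Set.empty, PySem.Set.empty)).2 ↔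
      ∃ p ∈ loop, a = p.2 ∨ a = p.2 + 1 := by
  rw [mem_foldA_snd loop _ _ (hv_range loop hpre) _ a, exists_range_iff_snd loop a]
  simp [PySem.Set.empty]

-- ===== B-side lemmas =====

theorem emitB_mem (s : List Int) (hpw : s.Pairwise (· < ·)) (a : Int) :
    a ∈ emitB s ↔ ∃ c ∈ s, a = c ∨ a = c + 1 := by
  induction s with
  | nil => simp [emitB]
  | cons v t ih =>
    cases t with
    | nil => simp [emitB]
    | cons w t2 =>
      have hpw' : (w :: t2).Pairwise (· < ·) := hpw.of_cons
      have hvw : v < w := (List.pairwise_cons.mp hpw).1 w List.mem_cons_self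
      by_cases hgap : w > v + 1
      · simp only [emitB, if_pos hgap, List.mem_cons, ih hpw']
        constructor
        · rintro (h | h | ⟨u, hu, h⟩)
          · exact ⟨v, Or.inl rfl, Or.inl h⟩
          · exact ⟨v, Or.inl rfl, Or.inr h⟩
          · exact ⟨u, Or.inr hu, h⟩
        · rintro ⟨u, (h | hu), hc⟩
          · subst h; tauto
          · exact Or.inr (Or.inr ⟨u, hu, hc⟩)
      · have hw : w = v + 1 := by omega
        simp only [emitB, if_neg hgap, List.mem_cons, ih hpw']
        constructor
        · rintro (h | ⟨u, hu, h⟩)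
          · exact ⟨v, Or.inl rfl, Or.inl h⟩
          · exact ⟨u, Or.inr hu, h⟩
        · rintro ⟨u, (h | hu), hc⟩
          · subst h
            rcases hc with h | h
            · exact Or.inl h
            · exact Or.inr ⟨w, Or.inl rfl, Or.inl (by omega)⟩
          · exact Or.inr ⟨u, hu, hc⟩

theorem emitB_pairwise (s : List Int) (hpw : s.Pairwise (· < ·)) :
    (emitB s).Pairwise (· < ·) := by
  induction s with
  | nil => simp [emitB]
  | cons v t ih =>
    cases t with
    | nil => simp [emitB]
    | cons w t2 =>
      have hpw' : (w :: t2).Pairwise (· < ·) := hpw.of_cons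
      have hvw : v < w := (List.pairwise_cons.mp hpw).1 w List.mem_cons_self
      have hb : ∀ a ∈ emitB (w :: t2), w ≤ a := by
        intro a ha
        obtain ⟨u, hu, h⟩ := (emitB_mem _ hpw' a).mp ha
        have : w ≤ u := by
          rcases List.mem_cons.mp hu with rfl | hu'
          · exact le_refl _
          · exact le_of_lt ((List.pairwise_cons.mp hpw').1 u hu')
        omega
      by_cases hgap : w > v + 1
      · simp only [emitB, if_pos hgap]
        refine List.pairwise_cons.mpr ⟨?_, List.pairwise_cons.mpr ⟨?_, ih hpw'⟩⟩
        · intro a ha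
          rcases List.mem_cons.mp ha with rfl | ha'
          · omega
          · have := hb a ha'; omega
        · intro a ha; have := hb a ha; omega
      · simp only [emitB, if_neg hgap]
        refine List.pairwise_cons.mpr ⟨?_, ih hpw'⟩
        intro a ha; have := hb a ha; omega

-- every element of a Pairwise-(≤) list is at most its last element
theorem le_getLast_of_pairwise (s : List Int) (h : s ≠ []) (hpw : s.Pairwise (· ≤ ·)) :
    ∀ v ∈ s, v ≤ s.getLast h := by
  induction s with
  | nil => exact absurd rfl h
  | cons x t ih =>
    cases t with
    | nil => intro v hv; simp at hv; simp [hv]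
    | cons y t2 =>
      intro v hv
      rw [List.getLast_cons (by simp : (y :: t2) ≠ [])]
      rcases List.mem_cons.mp hv with rfl | hv'
      · have hxy : v ≤ y := (List.pairwise_cons.mp hpw).1 y List.mem_cons_self
        have := ih (by simp) hpw.of_cons y List.mem_cons_self
        omega
      · exact ih (by simp) hpw.of_cons v hv'

-- the central lemma: A's per-axis sorted set equals B's axisB output
theorem axis_eq (sAset vals : List Int) (hvne : vals ≠ []) (hnd : sAset.Nodup)
    (hmem : ∀ a, a ∈ sAset ↔ ∃ v ∈ vals, a = v ∨ a = v + 1) :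
    PySem.List.sorted
      (PySem.Set.add (PySem.Set.add sAset ((PySem.List.min? sAset (fun v => v)).getD 0 - 1))
        ((PySem.List.max? sAset (fun v => v)).getD 0 + 1)) (fun v => v) false
      = axisB vals := by
  set s := PySem.List.sorted (PySem.Set.ofList vals) (fun v => v) false with hs
  have hpw : s.Pairwise (· < ·) := PySem.List.sorted_ofList_pairwise_lt vals
  have hmem_s : ∀ v, v ∈ s ↔ v ∈ vals := by
    intro v; rw [hs, PySem.List.mem_sorted, PySem.Set.mem_ofList]
  have hsne : s ≠ [] := by
    obtain ⟨v, hv⟩ := List.exists_mem_of_ne_nil vals hvne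
    exact List.ne_nil_of_mem ((hmem_s v).mpr hv)
  obtain ⟨h0, t, hst⟩ := List.exists_cons_of_ne_nil hsne
  have hm0 : PySem.List.pyGetD s 0 (0 : Int) = h0 := by
    rw [hst]; exact PySem.List.pyGetD_zero_cons _ _ _
  have hmL : PySem.List.pyGetD s (-1) (0 : Int) = s.getLast hsne :=
    PySem.List.pyGetD_neg_one s 0 hsne
  set L := s.getLast hsne with hL
  have h0_mem : h0 ∈ s := by rw [hst]; exact List.mem_cons_self
  have h0_le : ∀ v ∈ s, h0 ≤ v := by
    intro v hv
    rw [hst] at hv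
    rcases List.mem_cons.mp hv with rfl | hv'
    · exact le_refl _
    · exact le_of_lt ((List.pairwise_cons.mp (hst ▸ hpw)).1 v hv')
  have hL_mem : L ∈ s := List.getLast_mem hsne
  have le_L : ∀ v ∈ s, v ≤ L := le_getLast_of_pairwise s hsne (hpw.imp le_of_lt)
  have hsAne : sAset ≠ [] :=
    List.ne_nil_of_mem ((hmem h0).mpr ⟨h0, (hmem_s h0).mp h0_mem, Or.inl rfl⟩)
  have hminx : (PySem.List.min? sAset (fun v => v)).getD 0 = h0 := by
    obtain ⟨m, hmeq⟩ := Option.ne_none_iff_exists'.mp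
      (fun hc => hsAne ((PySem.List.min?_eq_none_iff sAset (fun v : Int => v)).mp hc))
    rw [hmeq, Option.getD_some]
    obtain ⟨v, hv, hcase⟩ := (hmem m).mp (PySem.List.min?_mem hmeq)
    have hvs : v ∈ s := (hmem_s v).mpr hv
    have h1 : h0 ≤ m := by
      have := h0_le v hvs
      rcases hcase with h | h <;> omega
    have h2 : m ≤ h0 := PySem.List.min?_isMin hmeq _ ((hmem h0).mpr ⟨h0, (hmem_s h0).mp h0_mem, Or.inl rfl⟩)
    omega
  have hmaxx : (PySem.List.max? sAset (fun v => v)).getD 0 = L + 1 := by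
    obtain ⟨m, hmeq⟩ := Option.ne_none_iff_exists'.mp
      (fun hc => hsAne ((PySem.List.max?_eq_none_iff sAset (fun v : Int => v)).mp hc))
    rw [hmeq, Option.getD_some]
    obtain ⟨v, hv, hcase⟩ := (hmem m).mp (PySem.List.max?_mem hmeq)
    have hvs : v ∈ s := (hmem_s v).mpr hv
    have h1 : m ≤ L + 1 := by
      have := le_L v hvs
      rcases hcase with h | h <;> omega
    have h2 : L + 1 ≤ m := PySem.List.max?_isMax hmeq _
      ((hmem (L + 1)).mpr ⟨L, (hmem_s L).mp hL_mem, Or.inr rfl⟩)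
    omega
  have hemit_bounds : ∀ a ∈ emitB s, h0 ≤ a ∧ a ≤ L + 1 := by
    intro a ha
    obtain ⟨u, hu, h⟩ := (emitB_mem s hpw a).mp ha
    have := h0_le u hu; have := le_L u hu
    constructor <;> omega
  have hLpw : ((h0 - 1) :: (emitB s ++ [L + 2])).Pairwise (· < ·) := by
    refine List.pairwise_cons.mpr ⟨?_, List.pairwise_append.mpr ⟨emitB_pairwise s hpw, ?_, ?_⟩⟩
    · intro a ha
      rcases List.mem_append.mp ha with ha' | ha'
      · have := (hemit_bounds a ha').1; omega
      · have hh0L := le_L h0 h0_mem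
        simp at ha'; omega
    · simp
    · intro a ha b hb
      simp at hb
      have := (hemit_bounds a ha).2; omega
  have hLnd : ((h0 - 1) :: (emitB s ++ [L + 2])).Nodup :=
    hLpw.imp (fun h => ne_of_lt h)
  have hperm : ((h0 - 1) :: (emitB s ++ [L + 2])).Perm
      (PySem.Set.add (PySem.Set.add sAset ((PySem.List.min? sAset (fun v => v)).getD 0 - 1))
        ((PySem.List.max? sAset (fun v => v)).getD 0 + 1)) := by
    rw [hminx, hmaxx]
    refine (List.perm_ext_iff_of_nodup hLnd
      (PySem.Set.nodup_add _ _ (PySem.Set.nodup_add _ _ hnd))).mpr ?_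
    intro a
    rw [PySem.Set.mem_add, PySem.Set.mem_add, hmem a]
    simp only [List.mem_cons, List.mem_append, List.not_mem_nil, or_false, emitB_mem s hpw]
    constructor
    · rintro (h | ⟨u, hu, hc⟩ | h)
      · exact Or.inl (Or.inr h)
      · exact Or.inl (Or.inl ⟨u, (hmem_s u).mp hu, hc⟩)
      · exact Or.inr (by omega)
    · rintro ((⟨u, hu, hc⟩ | h) | h)
      · exact Or.inr (Or.inl ⟨u, (hmem_s u).mpr hu, hc⟩)
      · exact Or.inl h
      · exact Or.inr (Or.inr (by omega))
  rw [axisB]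
  rw [← hs, hm0, hmL]
  apply PySem.List.sorted_eq_of_perm_of_pairwise_lt <;> first | exact hperm | exact hLpw

-- ===== VERDICT (by name: the statement is the Claim_ definition above) =====
theorem compress_coords_spec : Claim_equal_compress_coords := by
  intro loop _hdom hpre
  unfold Spec_compress_coords compress_coords compress_coords_alt
  dsimp only
  obtain ⟨hnd1, hnd2⟩ := nodup_foldA loop (PySem.List.len loop)
      (PySem.List.pyRange 0 (PySem.List.len loop) 1) (PySem.Set.empty, PySem.Set.empty)
      List.nodup_nil List.nodup_nil
  refine Prod.ext ?_ ?_
  · refine axis_eq _ _ (by simp [hpre.1]) hnd1 ?_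
    intro a
    rw [sA_mem_fst loop hpre a]
    constructor
    · rintro ⟨p, hp, h⟩; exact ⟨p.1, List.mem_map.mpr ⟨p, hp, rfl⟩, h⟩
    · rintro ⟨v, hv, h⟩
      obtain ⟨p, hp, rfl⟩ := List.mem_map.mp hv
      exact ⟨p, hp, h⟩
  · refine axis_eq _ _ (by simp [hpre.1]) hnd2 ?_
    intro a
    rw [sA_mem_snd loop hpre a]
    constructor
    · rintro ⟨p, hp, h⟩; exact ⟨p.2, List.mem_map.mpr ⟨p, hp, rfl⟩, h⟩
    · rintro ⟨v, hv, h⟩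
      obtain ⟨p, hp, rfl⟩ := List.mem_map.mp hv
      exact ⟨p, hp, h⟩
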